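-- pv_equiv track=rewrite | github.com/SuhanC/IonBind | sequence_postproc.py | get_func_group
-- ===== SOURCE A (Python) =====
-- def get_func_group(sequence):
--     polar=['C','N','P','Q','S','T']
--     alipathic=['A','G','I','L','M','V']
--     aromatic=['F','W','Y']
--     negative=['D','E']
--     positive=['H','K','R']
--
--     def get_func_representation(sequence,group_idx):
--         return([1 if group_idx.count(s) else 0 for s in sequence])
--
--     result_lst=[]
--     for func_group in [polar,alipathic,aromatic,negative,positive]:
--         result_lst.append(get_func_representation(sequence,func_group))
--     return(result_lst)
-- ===== SOURCE B (Python) =====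
-- def group_index(c):
--     if c in 'CNPQST':
--         return 0
--     if c in 'AGILMV':
--         return 1
--     if c in 'FWY':
--         return 2
--     if c in 'DE':
--         return 3
--     if c in 'HKR':
--         return 4
--     return None
--
--
-- def get_func_group(sequence):
--     polar, aliphatic, aromatic, negative, positive = [], [], [], [], []
--     for c in sequence:
--         g = group_index(c)
--         polar.append(1 if g == 0 else 0)
--         aliphatic.append(1 if g == 1 else 0)
--         aromatic.append(1 if g == 2 else 0)
--         negative.append(1 if g == 3 else 0)
--         positive.append(1 if g == 4 else 0)
--     return [polar, aliphatic, aromatic, negative, positive]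
-- ===== Notes on version B (the rewrite author's own statement) =====
-- stated objective: alternative
-- what changed: A makes five separate map passes over the sequence, one per group, testing membership with list.count; B makes a single pass over the sequence, computing each residue's group index once and appending its 0/1 indicator to all five rows column by column.
import Mathlib
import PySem

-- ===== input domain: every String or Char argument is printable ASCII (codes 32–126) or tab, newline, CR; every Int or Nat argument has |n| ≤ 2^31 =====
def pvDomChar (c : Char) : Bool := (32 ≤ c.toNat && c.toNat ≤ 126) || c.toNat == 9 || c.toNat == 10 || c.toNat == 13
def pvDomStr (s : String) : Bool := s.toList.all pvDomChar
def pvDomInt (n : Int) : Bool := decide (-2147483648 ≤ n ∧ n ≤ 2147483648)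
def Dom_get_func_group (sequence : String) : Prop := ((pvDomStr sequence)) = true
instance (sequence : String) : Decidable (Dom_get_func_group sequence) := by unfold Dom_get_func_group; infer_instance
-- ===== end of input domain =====

-- B replaces A's five membership-test passes over the sequence by one columnar pass
-- that classifies each residue once (objective: alternative decomposition; same result).

-- ===== PORT A =====
-- A's inner helper: [1 if group_idx.count(s) else 0 for s in sequence]
def getFuncRepresentation (sequence : List Char) (group_idx : List Char) : List Int :=
  sequence.map (fun s => if group_idx.count s ≠ 0 then (1 : Int) else 0)

def get_func_group (sequence : String) : List (List Int) :=
  let polar := ['C','N','P','Q','S','T']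
  let alipathic := ['A','G','I','L','M','V']
  let aromatic := ['F','W','Y']
  let negative := ['D','E']
  let positive := ['H','K','R']
  [polar, alipathic, aromatic, negative, positive].foldl
    (fun result_lst func_group => result_lst ++ [getFuncRepresentation sequence.toList func_group]) []

-- ===== PORT B =====
-- c ∈ 'CNPQST' (Python string membership) is exact as membership in the string's char list
def groupIndex (c : Char) : Option Int :=
  if c ∈ ['C','N','P','Q','S','T'] then some 0
  else if c ∈ ['A','G','I','L','M','V'] then some 1
  else if c ∈ ['F','W','Y'] then some 2
  else if c ∈ ['D','E'] then some 3
  else if c ∈ ['H','K','R'] then some 4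
  else none

def get_func_group_alt (sequence : String) : List (List Int) :=
  let st := sequence.toList.foldl
    (fun (r : List Int × List Int × List Int × List Int × List Int) c =>
      let g := groupIndex c
      (r.1 ++ [if g = some 0 then (1 : Int) else 0],
       r.2.1 ++ [if g = some 1 then (1 : Int) else 0],
       r.2.2.1 ++ [if g = some 2 then (1 : Int) else 0],
       r.2.2.2.1 ++ [if g = some 3 then (1 : Int) else 0],
       r.2.2.2.2 ++ [if g = some 4 then (1 : Int) else 0]))
    ([], [], [], [], [])
  [st.1, st.2.1, st.2.2.1, st.2.2.2.1, st.2.2.2.2]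

-- ===== PRECONDITION & SPEC =====
def Spec_get_func_group (sequence : String) (out : List (List Int)) : Prop := out = get_func_group_alt sequence
instance (sequence : String) (out : List (List Int)) : Decidable (Spec_get_func_group sequence out) := by unfold Spec_get_func_group; infer_instance

-- ===== CLAIM (what is proved, stated in full; the proofs are below) =====
def Claim_equal_get_func_group : Prop := ∀ (sequence : String), Dom_get_func_group sequence → Spec_get_func_group sequence (get_func_group sequence)

-- ===== LEMMAS AND PROOFS =====

theorem fold_alt_eq (l : List Char) (a0 a1 a2 a3 a4 : List Int) :
    l.foldl
      (fun (r : List Int × List Int × List Int × List Int × List Int) c =>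
        let g := groupIndex c
        (r.1 ++ [if g = some 0 then (1 : Int) else 0],
         r.2.1 ++ [if g = some 1 then (1 : Int) else 0],
         r.2.2.1 ++ [if g = some 2 then (1 : Int) else 0],
         r.2.2.2.1 ++ [if g = some 3 then (1 : Int) else 0],
         r.2.2.2.2 ++ [if g = some 4 then (1 : Int) else 0]))
      (a0, a1, a2, a3, a4)
    = (a0 ++ l.map (fun c => if groupIndex c = some 0 then (1 : Int) else 0),
       a1 ++ l.map (fun c => if groupIndex c = some 1 then (1 : Int) else 0),
       a2 ++ l.map (fun c => if groupIndex c = some 2 then (1 : Int) else 0),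
       a3 ++ l.map (fun c => if groupIndex c = some 3 then (1 : Int) else 0),
       a4 ++ l.map (fun c => if groupIndex c = some 4 then (1 : Int) else 0)) := by
  induction l generalizing a0 a1 a2 a3 a4 with
  | nil => simp
  | cons c t ih => simp [List.foldl_cons, ih, List.append_assoc]

theorem pointwise (c : Char) :
    (if (['C','N','P','Q','S','T'] : List Char).count c ≠ 0 then (1 : Int) else 0)
      = (if groupIndex c = some 0 then (1 : Int) else 0)
    ∧ (if (['A','G','I','L','M','V'] : List Char).count c ≠ 0 then (1 : Int) else 0)
      = (if groupIndex c = some 1 then (1 : Int) else 0)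
    ∧ (if (['F','W','Y'] : List Char).count c ≠ 0 then (1 : Int) else 0)
      = (if groupIndex c = some 2 then (1 : Int) else 0)
    ∧ (if (['D','E'] : List Char).count c ≠ 0 then (1 : Int) else 0)
      = (if groupIndex c = some 3 then (1 : Int) else 0)
    ∧ (if (['H','K','R'] : List Char).count c ≠ 0 then (1 : Int) else 0)
      = (if groupIndex c = some 4 then (1 : Int) else 0) := by
  by_cases hc : c ∈ ['C','N','P','Q','S','T','A','G','I','L','M','V','F','W','Y','D','E','H','K','R']
  · fin_cases hc <;> exact ⟨by decide, by decide, by decide, by decide, by decide⟩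
  · have h1 : c ∉ (['C','N','P','Q','S','T'] : List Char) := by simp_all
    have h2 : c ∉ (['A','G','I','L','M','V'] : List Char) := by simp_all
    have h3 : c ∉ (['F','W','Y'] : List Char) := by simp_all
    have h4 : c ∉ (['D','E'] : List Char) := by simp_all
    have h5 : c ∉ (['H','K','R'] : List Char) := by simp_all
    simp [groupIndex, List.count_eq_zero, h1, h2, h3, h4, h5]

-- ===== VERDICT (by name: the statement is the Claim_ definition above) =====
theorem get_func_group_spec : Claim_equal_get_func_group := by
  intro s _
  unfold Spec_get_func_group get_func_group get_func_group_alt getFuncRepresentation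
  simp only [List.foldl_cons, List.foldl_nil, List.nil_append,    List.cons_append, fold_alt_eq, List.cons.injEq, and_true]
  refine ⟨?_, ?_, ?_, ?_, ?_⟩ <;>
    exact List.map_congr_left (fun c _ => by have h := pointwise c; tauto)
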